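-- pv_equiv track=rewrite | github.com/mkumar2307/Python_Practise | count_fractions_occurrences.py | solution
-- ===== SOURCE A (Python) =====
-- def solution(x, y):
--     fraction_count = {}  # Dictionary to store counts of fractions
--     max_count = 0  # Variable to keep track of the maximum count
--
--     # Iterate over the fractions
--     for i in range(len(x)):
--         # Calculate the greatest common divisor (GCD) of x and y using the compute_gcd function
--         gcd = compute_gcd(x[i], y[i])
--
--         # Reduce the fraction by dividing both numerator and denominator by GCD
--         reduced_x = x[i] // gcd
--         reduced_y = y[i] // gcd
--
--         # Create a tuple representing the reduced fraction
--         fraction = (reduced_x, reduced_y)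
--
--         # Increment the count for the fraction in the dictionary
--         fraction_count[fraction] = fraction_count.get(fraction, 0) + 1
--
--         # Update the maximum count if necessary
--         if fraction_count[fraction] > max_count:
--             max_count = fraction_count[fraction]
--
--     return max_count
--
-- def compute_gcd(a, b):
--     # Calculate the greatest common divisor (GCD) using the Euclidean algorithm
--     while b:
--         a, b = b, a % b
--     return a
-- ===== SOURCE B (Python) =====
-- def compute_gcd(a, b):
--     # Calculate the greatest common divisor (GCD) using the Euclidean algorithm
--     while b:
--         a, b = b, a % b
--     return a
--
-- def solution(x, y):
--     # Reduce every fraction, sort the reduced tuples, then take the length of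
--     # the longest run of equal consecutive tuples in the sorted list.
--     reduced = []
--     for i in range(len(x)):
--         g = compute_gcd(x[i], y[i])
--         reduced.append((x[i] // g, y[i] // g))
--     reduced.sort()
--     best = 0
--     run = 0
--     prev = None
--     for f in reduced:
--         if f == prev:
--             run += 1
--         else:
--             run = 1
--             prev = f
--         if run > best:
--             best = run
--     return best
-- ===== Notes on version B (the rewrite author's own statement) =====
-- stated objective: alternative
-- what changed: Replaces the dictionary of running counts with an interleaved running maximum by a sort-then-scan strategy: B reduces every fraction, sorts the list of reduced tuples, and returns the length of the longest run of equal consecutive tuples.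
import Mathlib
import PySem

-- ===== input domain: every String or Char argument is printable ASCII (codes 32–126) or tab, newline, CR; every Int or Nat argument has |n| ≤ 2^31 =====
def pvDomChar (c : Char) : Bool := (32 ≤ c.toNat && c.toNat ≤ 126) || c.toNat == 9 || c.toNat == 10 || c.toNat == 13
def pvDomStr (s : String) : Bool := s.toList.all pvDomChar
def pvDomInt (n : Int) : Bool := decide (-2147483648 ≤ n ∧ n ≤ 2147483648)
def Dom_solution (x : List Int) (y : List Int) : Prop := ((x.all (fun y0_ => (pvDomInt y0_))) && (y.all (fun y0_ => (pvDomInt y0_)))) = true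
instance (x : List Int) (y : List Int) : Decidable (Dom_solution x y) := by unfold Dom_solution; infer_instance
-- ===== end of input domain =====

-- B replaces A's dict-of-running-counts with sort-then-scan: reduce every fraction,
-- sort the reduced tuples, return the longest run of equal consecutive tuples.

-- ===== PORT A =====
-- compute_gcd's 'while b:' loop, run on a fuel of |b|+1 steps (always enough, since
-- |a % b| < |b| shrinks the fuel measure); shared by both Pythons.
def pyGcdFuel : Nat → Int → Int → Int
  | 0, a, _ => a
  | k + 1, a, b => if b = 0 then a else pyGcdFuel k b (PySem.Int.mod a b)

def pyGcd (a b : Int) : Int := pyGcdFuel (b.natAbs + 1) a b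

def solution (x : List Int) (y : List Int) : Int :=
  (((PySem.List.pyRange 0 (PySem.List.len x) 1).foldl
      (fun (s : PySem.Dict (Int × Int) Int × Int) i =>
        let xi := PySem.List.pyGetD x i 0
        let yi := PySem.List.pyGetD y i 0
        let g := pyGcd xi yi
        let fr := (PySem.Int.floordiv xi g, PySem.Int.floordiv yi g)
        let v := s.1.getD fr 0 + 1
        (s.1.insert fr v, if v > s.2 then v else s.2))
      (PySem.Dict.empty, 0)).2)

-- ===== PORT B =====
-- the body of Source B's run-length loop: state (best, run, prev)
def scanStep (st : Int × Int × Option (Int × Int)) (f : Int × Int) :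
    Int × Int × Option (Int × Int) :=
  let run := if st.2.2 = some f then st.2.1 + 1 else 1
  let best := if run > st.1 then run else st.1
  (best, run, some f)

def solution_alt (x : List Int) (y : List Int) : Int :=
  let reduced := (PySem.List.pyRange 0 (PySem.List.len x) 1).foldl
    (fun (acc : List (Int × Int)) i =>
      let xi := PySem.List.pyGetD x i 0
      let yi := PySem.List.pyGetD y i 0
      let g := pyGcd xi yi
      acc ++ [(PySem.Int.floordiv xi g, PySem.Int.floordiv yi g)]) []
  let srt := PySem.List.sorted2 reduced Prod.fst Prod.snd
  (srt.foldl scanStep (0, 0, none)).1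

-- ===== PRECONDITION & SPEC =====
-- Pre_ excludes exactly the inputs on which BOTH Pythons raise: IndexError when
-- len(x) > len(y), and ZeroDivisionError when some paired fraction is 0/0.
def Pre_solution (x : List Int) (y : List Int) : Prop :=
  x.length ≤ y.length ∧ ∀ p ∈ x.zip y, ¬(p.1 = 0 ∧ p.2 = 0)
instance (x : List Int) (y : List Int) : Decidable (Pre_solution x y) := by unfold Pre_solution; infer_instance
def pvWitness_solution : List Int × List Int := ([2, 4, -3], [4, 8, 5])

def Spec_solution (x : List Int) (y : List Int) (out : Int) : Prop := out = solution_alt x y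
instance (x : List Int) (y : List Int) (out : Int) : Decidable (Spec_solution x y out) := by unfold Spec_solution; infer_instance

-- ===== CLAIM (what is proved, stated in full; the proofs are below) =====
def Claim_equal_solution : Prop := ∀ (x : List Int) (y : List Int), Dom_solution x y → Pre_solution x y → Spec_solution x y (solution x y)

-- ===== LEMMAS AND PROOFS =====

-- Python's lexicographic order on int pairs, as propositions
def lexlt (a b : Int × Int) : Prop := a.1 < b.1 ∨ (a.1 = b.1 ∧ a.2 < b.2)
def lexle (a b : Int × Int) : Prop := a.1 < b.1 ∨ (a.1 = b.1 ∧ a.2 ≤ b.2)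

-- sorted2's comparison function for key components fst, snd (reverse = false)
def lexBefore (a b : Int × Int) : Bool :=
  decide (a.1 < b.1) || (!decide (b.1 < a.1) && decide (a.2 < b.2))

theorem lexBefore_iff (a b : Int × Int) : lexBefore a b = true ↔ lexlt a b := by
  unfold lexBefore lexlt
  constructor
  · intro h; simp only [Bool.or_eq_true, Bool.and_eq_true, Bool.not_eq_true',
      decide_eq_true_eq, decide_eq_false_iff_not] at h; omega
  · intro h; simp only [Bool.or_eq_true, Bool.and_eq_true, Bool.not_eq_true',
      decide_eq_true_eq, decide_eq_false_iff_not]; omega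

theorem not_lexlt (a b : Int × Int) : ¬ lexlt b a ↔ lexle a b := by
  unfold lexlt lexle; omega

theorem lexle_of_lexlt {a b : Int × Int} (h : lexlt a b) : lexle a b := by
  unfold lexlt at h; unfold lexle; omega

theorem lexlt_of_lexlt_of_lexle {a b c : Int × Int} (h1 : lexlt a b) (h2 : lexle b c) :
    lexlt a c := by
  unfold lexlt at *; unfold lexle at h2; omega

theorem lexle_trans {a b c : Int × Int} (h1 : lexle a b) (h2 : lexle b c) : lexle a c := by
  unfold lexle at *; omega

theorem lexlt_irrefl (a : Int × Int) : ¬ lexlt a a := by unfold lexlt; omega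

theorem lexlt_of_lexle_ne {p e : Int × Int} (h : lexle p e) (hne : e ≠ p) : lexlt p e := by
  unfold lexle at h; unfold lexlt
  rcases h with h | ⟨h1, h2⟩
  · exact Or.inl h
  · refine Or.inr ⟨h1, lt_of_le_of_ne h2 ?_⟩
    intro h3
    exact hne (Prod.ext h1.symm h3.symm)

-- ordered insertion preserves sortedness (Pairwise lexle)
theorem insertBy_pairwise (v : Int × Int) :
    ∀ (l : List (Int × Int)), l.Pairwise lexle →
      (PySem.List.insertBy lexBefore v l).Pairwise lexle := by
  intro l
  induction l with
  | nil => intro _; simp [PySem.List.insertBy]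
  | cons a t ih =>
      intro hp
      rw [List.pairwise_cons] at hp
      by_cases hb : lexBefore v a = true
      · have hva : lexlt v a := (lexBefore_iff v a).mp hb
        simp only [PySem.List.insertBy, hb, if_true]
        refine List.pairwise_cons.mpr ⟨?_, List.pairwise_cons.mpr hp⟩
        intro z hz
        rcases List.mem_cons.mp hz with rfl | hz'
        · exact lexle_of_lexlt hva
        · exact lexle_trans (lexle_of_lexlt hva) (hp.1 z hz')
      · have hav : lexle a v := (not_lexlt a v).mp (fun h => hb ((lexBefore_iff v a).mpr h))
        simp only [PySem.List.insertBy, hb]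
        refine List.pairwise_cons.mpr ⟨?_, ih hp.2⟩
        intro z hz
        rcases (PySem.List.mem_insertBy ..).mp hz with rfl | hz'
        · exact hav
        · exact hp.1 z hz'

theorem foldl_insertBy_pairwise (xs : List (Int × Int)) :
    ∀ acc : List (Int × Int), acc.Pairwise lexle →
      (xs.foldl (fun acc v => PySem.List.insertBy lexBefore v acc) acc).Pairwise lexle := by
  induction xs with
  | nil => intro acc h; simpa using h
  | cons a t ih => intro acc h; exact ih _ (insertBy_pairwise a acc h)

theorem sorted2_pairwise (xs : List (Int × Int)) :
    (PySem.List.sorted2 xs Prod.fst Prod.snd).Pairwise lexle := by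
  have : PySem.List.sorted2 xs Prod.fst Prod.snd
      = xs.foldl (fun acc v => PySem.List.insertBy lexBefore v acc) [] := rfl
  rw [this]
  exact foldl_insertBy_pairwise xs [] List.Pairwise.nil

-- absorbing the seed run "1" after a group break: the sup over the new group's counts
theorem max_one_sup_count (e : Int × Int) (t : List (Int × Int)) :
    max 1 (t.toFinset.sup (fun f => t.count f + if f = e then 1 else 0))
      = (e :: t).toFinset.sup (fun f => (e :: t).count f) := by
  have hsup : t.toFinset.sup (fun f => t.count f + if f = e then 1 else 0)
      = t.toFinset.sup (fun f => (e :: t).count f) := by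
    apply Finset.sup_congr rfl
    intro g _
    by_cases hge : g = e
    · subst hge; simp [List.count_cons_self]
    · simp [hge, Ne.symm hge]
  rw [hsup, List.toFinset_cons, Finset.sup_insert, List.count_cons_self]
  by_cases hmem : e ∈ t
  · have hle : (e :: t).count e ≤ t.toFinset.sup (fun f => (e :: t).count f) :=
      Finset.le_sup (f := fun f => (e :: t).count f) (List.mem_toFinset.mpr hmem)
    rw [List.count_cons_self] at hle
    omega
  · have hc : t.count e = 0 := List.count_eq_zero_of_not_mem hmem
    rw [hc]

-- the run-length scan on a sorted list, started just after seeing a run of `run`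
-- copies of the minimum p, computes the maximum multiplicity
theorem scan_sorted (l : List (Int × Int)) :
    ∀ (p : Int × Int) (best run : Nat), l.Pairwise lexle → (∀ e ∈ l, lexle p e) →
      run ≤ best →
      (l.foldl scanStep ((best : Nat) , (run : Nat), some p)).1
        = ((max best (l.toFinset.sup (fun f => l.count f + if f = p then run else 0)) : Nat) : Int) := by
  induction l with
  | nil => intro p best run _ _ _; simp
  | cons e t ih =>
      intro p best run hp hall hrb
      rw [List.pairwise_cons] at hp
      by_cases hep : e = p
      · subst hep
        have hstep : scanStep ((best : Nat), (run : Nat), some e) e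
            = (((max best (run + 1) : Nat) : Int), ((run + 1 : Nat) : Int), some e) := by
          simp only [scanStep]
          refine Prod.ext ?_ (Prod.ext (by push_cast; ring) rfl)
          split_ifs <;> push_cast <;> omega
        rw [List.foldl_cons, hstep,
          ih e (max best (run + 1)) (run + 1) hp.2 hp.1 (le_max_right _ _)]
        refine congrArg _ ?_
        have hsup : t.toFinset.sup (fun f => t.count f + if f = e then run + 1 else 0)
            = t.toFinset.sup (fun f => (e :: t).count f + if f = e then run else 0) := by
          apply Finset.sup_congr rfl
          intro g _
          by_cases hge : g = e
          · subst hge; simp [List.count_cons_self]; omega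
          · simp [hge, Ne.symm hge]
        rw [hsup, List.toFinset_cons, Finset.sup_insert, List.count_cons_self,
          if_pos rfl]
        by_cases hmem : e ∈ t
        · have hbeta : (fun f => (e :: t).count f + if f = e then run else 0) e
              = t.count e + 1 + run := by
            simp [List.count_cons_self]
          have hle : t.count e + 1 + run ≤
              t.toFinset.sup (fun f => (e :: t).count f + if f = e then run else 0) :=
            hbeta ▸ Finset.le_sup (f := fun f => (e :: t).count f + if f = e then run else 0)
              (List.mem_toFinset.mpr hmem)
          omega
        · have hc : t.count e = 0 := List.count_eq_zero_of_not_mem hmem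
          -- every g ∈ t has g ≠ e, so the sup over t ignores the e-adjustment
          have hagree : t.toFinset.sup (fun f => (e :: t).count f + if f = e then run else 0)
              = t.toFinset.sup (fun f => t.count f) := by
            apply Finset.sup_congr rfl
            intro g hg
            have hge : g ≠ e := fun h => hmem (h ▸ List.mem_toFinset.mp hg)
            simp [hge, Ne.symm hge]
          rw [hagree, hc]
          omega
      · -- group break: e ≠ p, so p never occurs again and the run restarts at 1
        have hpe : lexlt p e := lexlt_of_lexle_ne (hall e (List.mem_cons_self ..)) hep
        have hpnot : p ∉ e :: t := by
          intro hmem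
          rcases List.mem_cons.mp hmem with rfl | hmem'
          · exact lexlt_irrefl p hpe
          · exact lexlt_irrefl p (lexlt_of_lexlt_of_lexle hpe (hp.1 p hmem'))
        have hstep : scanStep ((best : Nat), (run : Nat), some p) e
            = (((max best 1 : Nat) : Int), ((1 : Nat) : Int), some e) := by
          have hne : (some p : Option (Int × Int)) ≠ some e := by
            intro h; exact hep (Option.some.inj h).symm
          simp only [scanStep, if_neg hne]
          refine Prod.ext ?_ (Prod.ext (by norm_num) rfl)
          split_ifs <;> push_cast <;> omega
        rw [List.foldl_cons, hstep,
          ih e (max best 1) 1 hp.2 hp.1 (le_max_right _ _)]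
        refine congrArg _ ?_
        have htarget : (e :: t).toFinset.sup (fun f => (e :: t).count f + if f = p then run else 0)
            = (e :: t).toFinset.sup (fun f => (e :: t).count f) := by
          apply Finset.sup_congr rfl
          intro g hg
          have hgp : g ≠ p := fun h => hpnot (h ▸ List.mem_toFinset.mp hg)
          simp [hgp]
        rw [htarget, ← max_one_sup_count e t]
        omega

-- A's dict/running-max fold, characterised: starting from a dict holding counts b and a
-- running maximum m, it returns the max of m and the largest final count
theorem A_fold_eq_sup (l : List (Int × Int)) :
    ∀ (d : PySem.Dict (Int × Int) Int) (m : Nat) (b : (Int × Int) → Nat),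
      (∀ f, d.getD f 0 = (b f : Int)) →
      ((l.foldl
          (fun (s : PySem.Dict (Int × Int) Int × Int) fr =>
            let v := s.1.getD fr 0 + 1
            (s.1.insert fr v, if v > s.2 then v else s.2))
          (d, (m : Int))).2)
        = ((max m (l.toFinset.sup (fun f => b f + l.count f)) : Nat) : Int) := by
  induction l with
  | nil => intro d m b hb; simp
  | cons a l' ih =>
      intro d m b hb
      have hstep : (if (d.getD a 0 + 1 : Int) > (m : Int) then d.getD a 0 + 1 else (m : Int))
          = ((max m (b a + 1) : Nat) : Int) := by
        rw [hb a]; split_ifs <;> push_cast <;> omega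
      have hinv : ∀ f, (d.insert a (d.getD a 0 + 1)).getD f 0
          = (((fun g => if g = a then b a + 1 else b g) f : Nat) : Int) := by
        intro f
        rw [PySem.Dict.getD_insert]
        by_cases hf : f = a
        · subst hf
          rw [if_pos rfl, hb f]
          have hbeta : ((fun g => if g = f then b f + 1 else b g) f) = b f + 1 := by simp
          rw [hbeta]
          push_cast; ring
        · rw [if_neg hf, hb f]; simp [hf]
      simp only [List.foldl_cons]
      rw [hstep]
      rw [ih (d.insert a (d.getD a 0 + 1)) (max m (b a + 1))
          (fun g => if g = a then b a + 1 else b g) hinv]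
      congr 1
      have hsup : l'.toFinset.sup (fun g => (if g = a then b a + 1 else b g) + l'.count g)
          = l'.toFinset.sup (fun g => b g + (a :: l').count g) := by
        apply Finset.sup_congr rfl
        intro g hg
        by_cases hga : g = a
        · subst hga; simp [List.count_cons_self]; omega
        · simp [hga, Ne.symm hga]
      rw [hsup]
      rw [List.toFinset_cons, Finset.sup_insert]
      simp only [List.count_cons_self]
      by_cases hmem : a ∈ l'
      · have hle : b a + ((a :: l').count a) ≤
            l'.toFinset.sup (fun g => b g + (a :: l').count g) :=
          Finset.le_sup (f := fun g => b g + (a :: l').count g) (List.mem_toFinset.mpr hmem)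
        rw [List.count_cons_self] at hle
        omega
      · have hc : l'.count a = 0 := List.count_eq_zero_of_not_mem hmem
        have hagree : l'.toFinset.sup (fun g => b g + (a :: l').count g)
            = l'.toFinset.sup (fun g => b g + l'.count g) := by
          apply Finset.sup_congr rfl
          intro g hg
          have hga : g ≠ a := fun h => hmem (h ▸ List.mem_toFinset.mp hg)
          simp [Ne.symm hga]
        rw [hagree, hc]
        omega

-- the reduced fraction of one pair (the per-index expression both ports compute)
def redf (a b : Int) : Int × Int :=
  (PySem.Int.floordiv a (pyGcd a b), PySem.Int.floordiv b (pyGcd a b))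

-- Source B's loop started fresh (prev = None): on a sorted list it computes the max multiplicity
theorem scan_none (l : List (Int × Int)) (hp : l.Pairwise lexle) :
    (l.foldl scanStep (0, 0, none)).1 = ((l.toFinset.sup (fun f => l.count f) : Nat) : Int) := by
  cases l with
  | nil => simp
  | cons e t =>
      rw [List.pairwise_cons] at hp
      have hstep : scanStep (0, 0, none) e = (((1 : Nat) : Int), ((1 : Nat) : Int), some e) := by
        simp [scanStep]
      rw [List.foldl_cons, hstep, scan_sorted t e 1 1 hp.2 hp.1 (le_refl 1)]
      exact congrArg _ (max_one_sup_count e t)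

theorem solution_eq (x y : List Int) : solution x y = solution_alt x y := by
  unfold solution solution_alt
  have hrange : PySem.List.pyRange 0 (PySem.List.len x) 1
      = (List.range x.length).map (fun k => ((k : Nat) : Int)) := by
    rw [PySem.List.pyRange_one]
    simp [PySem.List.len]
  rw [hrange, List.foldl_map, List.foldl_map]
  simp only [PySem.List.pyGetD_natCast]
  -- both per-index bodies now compute redf of the k-th entries; name the common list
  set L := (List.range x.length).map
    (fun k => redf (x.getD k 0) (y.getD k 0)) with hL
  -- A's fold is the dict fold over L
  have hbodyA : (List.range x.length).foldl
      (fun (s : PySem.Dict (Int × Int) Int × Int) k =>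
        let xi := x.getD k 0
        let yi := y.getD k 0
        let g := pyGcd xi yi
        let fr := (PySem.Int.floordiv xi g, PySem.Int.floordiv yi g)
        let v := s.1.getD fr 0 + 1
        (s.1.insert fr v, if v > s.2 then v else s.2))
      (PySem.Dict.empty, 0)
      = L.foldl
          (fun (s : PySem.Dict (Int × Int) Int × Int) fr =>
            let v := s.1.getD fr 0 + 1
            (s.1.insert fr v, if v > s.2 then v else s.2))
          (PySem.Dict.empty, 0) := by
    rw [hL, List.foldl_map]
    rfl
  -- B's list-building fold materialises L
  have hbodyB : (List.range x.length).foldl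
      (fun (acc : List (Int × Int)) k =>
        let xi := x.getD k 0
        let yi := y.getD k 0
        let g := pyGcd xi yi
        acc ++ [(PySem.Int.floordiv xi g, PySem.Int.floordiv yi g)]) []
      = L := by
    rw [PySem.List.foldl_append_singleton_eq_map, List.nil_append, hL]
    rfl
  rw [hbodyA, hbodyB]
  -- A side: the dict/running-max characterisation with empty dict, zero max
  have hA := A_fold_eq_sup L PySem.Dict.empty 0 (fun _ => 0) (fun f => by simp)
  simp only [Nat.cast_zero] at hA
  rw [hA]
  -- B side: the run-length scan of the sorted copy of L
  rw [scan_none (PySem.List.sorted2 L Prod.fst Prod.snd) (sorted2_pairwise L)]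
  -- the sorted copy is a permutation of L: same toFinset, same counts
  have hperm := PySem.List.sorted2_perm L Prod.fst Prod.snd false
  refine congrArg _ ?_
  rw [List.toFinset_eq_of_perm _ _ hperm,
    Finset.sup_congr rfl (fun f _ => hperm.count_eq f),
    max_eq_right (Nat.zero_le _)]
  exact Finset.sup_congr rfl (fun f _ => Nat.zero_add _)

-- ===== VERDICT (by name: the statement is the Claim_ definition above) =====
theorem solution_spec : Claim_equal_solution := by
  intro x y _ _
  unfold Spec_solution
  exact solution_eq x y
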